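-- pv_equiv track=rewrite | github.com/Yuriy-vasylevsky/taroBot | taro/dialog_tarot.py | _limit_questions
-- ===== SOURCE A (Python) =====
-- def _limit_questions(text: str, max_q: int = 1) -> str:
--     if not text:
--         return ""
--     if text.count("?") <= max_q:
--         return text
--     out = []
--     q_used = 0
--     for ch in text:
--         if ch == "?":
--             if q_used < max_q:
--                 out.append("?")
--                 q_used += 1
--             else:
--                 out.append(".")
--         else:
--             out.append(ch)
--     return "".join(out)
-- ===== SOURCE B (Python) =====
-- def _limit_questions(text: str, max_q: int = 1) -> str:
--     if not text:
--         return ""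
--     if "?" not in text:
--         return text
--     if text.count("?") <= max_q:
--         return text
--     k = max(max_q, 0)
--     parts = text.split("?")
--     return "?".join(parts[:k + 1]) + "." + ".".join(parts[k + 1:])
-- ===== Notes on version B (the rewrite author's own statement) =====
-- stated objective: alternative
-- what changed: Replaces the character-by-character accumulator loop with counting plus a split('?')/join decomposition: keep the first max(max_q,0) separators by rejoining the first k+1 parts with '?' and rejoin the rest with '.', so no per-character state machine remains.
import Mathlib
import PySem

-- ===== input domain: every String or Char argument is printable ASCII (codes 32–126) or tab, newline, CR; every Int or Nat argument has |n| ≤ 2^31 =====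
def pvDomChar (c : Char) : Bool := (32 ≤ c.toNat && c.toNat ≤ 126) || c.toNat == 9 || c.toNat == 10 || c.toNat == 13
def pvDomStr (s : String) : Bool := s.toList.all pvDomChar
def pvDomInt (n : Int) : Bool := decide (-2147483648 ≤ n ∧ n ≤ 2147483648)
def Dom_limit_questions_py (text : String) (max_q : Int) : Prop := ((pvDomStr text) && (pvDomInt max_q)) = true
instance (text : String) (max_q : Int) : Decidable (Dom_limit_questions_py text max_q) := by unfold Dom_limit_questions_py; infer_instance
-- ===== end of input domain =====

-- B replaces A's character-by-character accumulator loop by a split('?')/join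
-- decomposition (keep the first max(max_q,0) separators, rejoin the rest with '.');
-- objective: alternative (same O(n) cost, different algorithm).


-- ===== PORT A =====
-- literal transliteration of `_limit_questions`: the loop is a foldl over the
-- characters with state (out, q_used), `"".join(out)` is Str.join "" on the
-- collected one-character strings
def limit_questions_py (text : String) (max_q : Int) : String :=
  if text = "" then ""
  else if (PySem.Str.count text "?" : Int) ≤ max_q then text
  else
    let st := text.toList.foldl
      (fun (st : List Char × Int) ch =>
        if ch = '?' then
          if st.2 < max_q then (st.1 ++ ['?'], st.2 + 1)
          else (st.1 ++ ['.'], st.2)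
        else (st.1 ++ [ch], st.2)) ([], 0)
    PySem.Str.join "" (st.1.map (fun c => String.ofList [c]))

-- ===== PORT B =====
-- literal transliteration of Source B: trivial returns, then k = max(max_q, 0),
-- parts = text.split("?"), and "?".join(parts[:k+1]) + "." + ".".join(parts[k+1:])
def limit_questions_py_alt (text : String) (max_q : Int) : String :=
  if text = "" then ""
  else if PySem.Str.isIn "?" text = false then text
  else if (PySem.Str.count text "?" : Int) ≤ max_q then text
  else
    let k : Int := max max_q 0
    let parts : List String := (PySem.Chars.splitOn text.toList ['?']).map String.ofList
    PySem.Str.join "?" (PySem.List.slice parts none (some (k + 1))) ++ "." ++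
      PySem.Str.join "." (PySem.List.slice parts (some (k + 1)) none)

-- ===== PRECONDITION & SPEC =====
def Spec_limit_questions_py (text : String) (max_q : Int) (out : String) : Prop := out = limit_questions_py_alt text max_q
instance (text : String) (max_q : Int) (out : String) : Decidable (Spec_limit_questions_py text max_q out) := by unfold Spec_limit_questions_py; infer_instance

-- ===== CLAIM (what is proved, stated in full; the proofs are below) =====
def Claim_equal_limit_questions_py : Prop := ∀ (text : String) (max_q : Int), Dom_limit_questions_py text max_q → Spec_limit_questions_py text max_q (limit_questions_py text max_q)

-- ===== LEMMAS AND PROOFS =====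

-- spec-level form of A's loop: keep the first k '?', replace the rest by '.'
def pvKeep : Nat → List Char → List Char
  | _, [] => []
  | k, c :: t =>
    if c = '?' then
      (match k with
       | 0 => '.' :: pvKeep 0 t
       | k' + 1 => '?' :: pvKeep k' t)
    else c :: pvKeep k t

-- spec-level form of text.split("?") (pre = reversed current chunk, kept in order here)
def pvSplit (pre : List Char) : List Char → List (List Char)
  | [] => [pre]
  | c :: t => if c = '?' then pre :: pvSplit [] t else pvSplit (pre ++ [c]) t

theorem pvSplit_ne_nil (pre : List Char) (l : List Char) : pvSplit pre l ≠ [] := by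
  induction l generalizing pre with
  | nil => simp [pvSplit]
  | cons c t ih => by_cases h : c = '?' <;> simp [pvSplit, h, ih]

theorem pv_prefix_not_q {c : Char} (t : List Char) (h : ¬ c = '?') :
    (['?'] : List Char).isPrefixOf (c :: t) = false := by
  simp [List.isPrefixOf]; exact fun hc => h hc.symm

theorem pv_count_go (l : List Char) : ∀ (fuel acc : Nat), l.length ≤ fuel →
    PySem.Chars.count.go ['?'] fuel l acc = acc + l.count '?' := by
  induction l with
  | nil => intro fuel acc _; cases fuel <;> simp [PySem.Chars.count.go]
  | cons c t ih =>
    intro fuel acc hf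
    cases fuel with
    | zero => simp at hf
    | succ f =>
      have hf' : t.length ≤ f := by simpa using Nat.le_of_succ_le_succ hf
      by_cases h : c = '?'
      · subst h
        rw [show PySem.Chars.count.go ['?'] (f+1) ('?' :: t) acc
              = PySem.Chars.count.go ['?'] f t (acc+1) from by
            simp [PySem.Chars.count.go, List.isPrefixOf],
          ih f (acc + 1) hf', List.count_cons]
        simp; omega
      · rw [show PySem.Chars.count.go ['?'] (f+1) (c :: t) acc
              = PySem.Chars.count.go ['?'] f t acc from by
            simp [PySem.Chars.count.go, pv_prefix_not_q t h],
          ih f acc hf', List.count_cons]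
        simp [h]

theorem pv_count (l : List Char) : PySem.Chars.count l ['?'] = l.count '?' := by
  have := pv_count_go l l.length 0 (le_refl _)
  simpa [PySem.Chars.count] using this

theorem pv_splitOn_go (l : List Char) : ∀ (fuel : Nat) (cur : List Char) (acc : List (List Char)),
    l.length ≤ fuel →
    PySem.Chars.splitOn.go ['?'] fuel l cur acc = acc.reverse ++ pvSplit cur.reverse l := by
  induction l with
  | nil =>
    intro fuel cur acc _
    cases fuel <;> simp [PySem.Chars.splitOn.go, pvSplit]
  | cons c t ih =>
    intro fuel cur acc hf
    cases fuel with
    | zero => simp at hf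
    | succ f =>
      have hf' : t.length ≤ f := by simpa using Nat.le_of_succ_le_succ hf
      by_cases h : c = '?'
      · subst h
        rw [show PySem.Chars.splitOn.go ['?'] (f+1) ('?' :: t) cur acc
              = PySem.Chars.splitOn.go ['?'] f t [] (cur.reverse :: acc) from by
            simp [PySem.Chars.splitOn.go, List.isPrefixOf],
          ih f [] (cur.reverse :: acc) hf']
        simp [pvSplit]
      · rw [show PySem.Chars.splitOn.go ['?'] (f+1) (c :: t) cur acc
              = PySem.Chars.splitOn.go ['?'] f t (c :: cur) acc from by
            simp [PySem.Chars.splitOn.go, pv_prefix_not_q t h],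
          ih f (c :: cur) acc hf']
        simp [pvSplit, h]

theorem pv_splitOn (l : List Char) : PySem.Chars.splitOn l ['?'] = pvSplit [] l := by
  have := pv_splitOn_go l (l.length + 1) [] [] (by omega)
  simpa [PySem.Chars.splitOn] using this

-- A's loop computes pvKeep
theorem pv_foldl_keep (max_q : Int) (l : List Char) :
    ∀ (out : List Char) (q : Int),
    (l.foldl (fun (st : List Char × Int) ch =>
        if ch = '?' then
          if st.2 < max_q then (st.1 ++ ['?'], st.2 + 1)
          else (st.1 ++ ['.'], st.2)
        else (st.1 ++ [ch], st.2)) (out, q)).1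
      = out ++ pvKeep (max_q - q).toNat l := by
  induction l with
  | nil => intro out q; simp [pvKeep]
  | cons c t ih =>
    intro out q
    by_cases h : c = '?'
    · subst h
      by_cases hq : q < max_q
      · have hk : (max_q - q).toNat = (max_q - (q + 1)).toNat + 1 := by omega
        simp only [List.foldl_cons, hq, if_true]
        rw [ih (out ++ ['?']) (q + 1), hk]
        simp [pvKeep]
      · have hk : (max_q - q).toNat = 0 := by omega
        simp only [List.foldl_cons, hq, if_true, if_false]
        rw [ih (out ++ ['.']) q, hk]
        simp [pvKeep]
    · simp only [List.foldl_cons, if_neg h]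
      rw [ih (out ++ [c]) q]
      simp [pvKeep, h]

theorem pv_keep_of_no_q (k : Nat) (l : List Char) (h : '?' ∉ l) : pvKeep k l = l := by
  induction l with
  | nil => simp [pvKeep]
  | cons c t ih =>
    simp only [List.mem_cons, not_or] at h
    have hc : ¬ c = '?' := fun e => h.1 e.symm
    simp [pvKeep, hc, ih h.2]

theorem pv_intercalate_cons (s a : List Char) (rest : List (List Char)) (h : rest ≠ []) :
    List.intercalate s (a :: rest) = a ++ s ++ List.intercalate s rest := by
  cases rest with
  | nil => exact absurd rfl h
  | cons b r => simp [List.intercalate, List.intersperse]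

-- ".".join(parts) undoes the split with every '?' replaced by '.'
theorem pv_join_dot (l : List Char) : ∀ (pre : List Char),
    List.intercalate ['.'] (pvSplit pre l) = pre ++ pvKeep 0 l := by
  induction l with
  | nil => intro pre; simp [pvSplit, pvKeep, List.intercalate]
  | cons c t ih =>
    intro pre
    by_cases h : c = '?'
    · subst h
      rw [show pvSplit pre ('?' :: t) = pre :: pvSplit [] t from by simp [pvSplit],
        pv_intercalate_cons _ _ _ (pvSplit_ne_nil _ _), ih []]
      simp [pvKeep]
    · rw [show pvSplit pre (c :: t) = pvSplit (pre ++ [c]) t from by simp [pvSplit, h], ih]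
      simp [pvKeep, h]

-- the main decomposition: keep k '?' = rejoin first k+1 parts with '?', the rest with '.'
theorem pv_main (l : List Char) : ∀ (pre : List Char) (k : Nat), k + 1 ≤ l.count '?' →
    List.intercalate ['?'] ((pvSplit pre l).take (k + 1)) ++
      '.' :: List.intercalate ['.'] ((pvSplit pre l).drop (k + 1))
    = pre ++ pvKeep k l := by
  induction l with
  | nil => intro pre k h; simp at h
  | cons c t ih =>
    intro pre k h
    by_cases hc : c = '?'
    · subst hc
      have hsp : pvSplit pre ('?' :: t) = pre :: pvSplit [] t := by simp [pvSplit]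
      cases k with
      | zero =>
        rw [hsp]
        simp only [List.take_succ_cons, List.take_zero, List.drop_succ_cons, List.drop_zero]
        rw [pv_join_dot t []]
        simp [pvKeep, List.intercalate]
      | succ k' =>
        have hcount : k' + 1 ≤ t.count '?' := by
          simp at h; omega
        have htake : ((pvSplit [] t).take (k' + 1)) ≠ [] := by
          have := pvSplit_ne_nil ([] : List Char) t
          cases hsp' : pvSplit ([] : List Char) t with
          | nil => exact absurd hsp' this
          | cons p ps => simp
        rw [hsp]
        simp only [List.take_succ_cons, List.drop_succ_cons]
        rw [pv_intercalate_cons _ _ _ htake, List.append_assoc, ih [] k' hcount]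
        simp [pvKeep]
    · have hsp : pvSplit pre (c :: t) = pvSplit (pre ++ [c]) t := by simp [pvSplit, hc]
      have hcount : k + 1 ≤ t.count '?' := by simpa [List.count_cons, hc] using h
      rw [hsp, ih (pre ++ [c]) k hcount]
      simp [pvKeep, hc]

theorem pv_string_ext {s t : String} (h : s.toList = t.toList) : s = t := by
  rw [← String.ofList_toList (s := s), h, String.ofList_toList]

theorem pv_join_eq (sep : List Char) (parts : List (List Char)) :
    PySem.Chars.join sep parts = List.intercalate sep parts := rfl

-- ===== VERDICT (by name: the statement is the Claim_ definition above) =====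
theorem limit_questions_py_spec : Claim_equal_limit_questions_py := by
  intro text max_q _
  unfold Spec_limit_questions_py limit_questions_py limit_questions_py_alt
  by_cases hemp : text = ""
  · simp [hemp]
  · simp only [if_neg hemp]
    rw [show PySem.Str.count text "?" = PySem.Chars.count text.toList ['?'] from rfl,
      show PySem.Str.isIn "?" text = PySem.Chars.isIn ['?'] text.toList from rfl,
      pv_count text.toList]
    by_cases hle : ((text.toList.count '?' : Nat) : Int) ≤ max_q
    · by_cases hin : PySem.Chars.isIn ['?'] text.toList = false <;> simp [hle, hin]
    · simp only [if_neg hle]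
      by_cases hin : PySem.Chars.isIn ['?'] text.toList = false
      · -- no '?': A's loop copies the text unchanged
        have hmem : '?' ∉ text.toList := by
          have := (PySem.Chars.isIn_eq_false_iff ['?'] text.toList).mp hin
          intro hm
          obtain ⟨s, t, hst⟩ := List.append_of_mem hm
          exact this ⟨s, t, by simpa using hst.symm⟩
        simp only [hin, if_true]
        rw [pv_foldl_keep max_q text.toList [] 0]
        simp only [List.nil_append, sub_zero]
        rw [pv_keep_of_no_q _ _ hmem]
        simp [PySem.Str.join, Function.comp_def, String.toList_ofList,
          PySem.Chars.join_nil_singletons, String.ofList_toList]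
      · -- the real case: count > max_q and '?' present
        rw [if_neg hin]
        have hmem : '?' ∈ text.toList := by
          by_contra hm
          apply hin
          rw [PySem.Chars.isIn_eq_false_iff]
          intro ⟨s, t, hst⟩
          exact hm (by rw [← hst]; simp)
        have hcpos : 1 ≤ text.toList.count '?' := List.count_pos_iff.mpr hmem
        set k : Int := max max_q 0 with hk
        have hkk : (k = max_q ∧ 0 ≤ max_q) ∨ (k = 0 ∧ max_q < 0) := by
          by_cases h0 : 0 ≤ max_q
          · exact Or.inl ⟨max_eq_left h0, h0⟩
          · exact Or.inr ⟨max_eq_right (by omega), by omega⟩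
        have hklt : k.toNat + 1 ≤ text.toList.count '?' := by omega
        -- A side
        rw [pv_foldl_keep max_q text.toList [] 0]
        simp only [List.nil_append, sub_zero]
        have hAk : max_q.toNat = k.toNat := by omega
        rw [hAk]
        -- B side: slices are take/drop
        have hsl1 : PySem.List.slice ((PySem.Chars.splitOn text.toList ['?']).map String.ofList)
            none (some (k + 1))
            = ((pvSplit [] text.toList).take (k.toNat + 1)).map String.ofList := by
          rw [PySem.List.slice_to _ (by omega), pv_splitOn]
          rw [show ((k + 1 : Int)).toNat = k.toNat + 1 from by omega, List.map_take]
        have hsl2 : PySem.List.slice ((PySem.Chars.splitOn text.toList ['?']).map String.ofList)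
            (some (k + 1)) none
            = ((pvSplit [] text.toList).drop (k.toNat + 1)).map String.ofList := by
          rw [PySem.List.slice_from _ (by omega), pv_splitOn]
          rw [show ((k + 1 : Int)).toNat = k.toNat + 1 from by omega, List.map_drop]
        rw [hsl1, hsl2]
        -- reduce everything to toList equality
        apply pv_string_ext
        simp only [PySem.Str.join, String.toList_append, String.toList_ofList,
          List.map_map, Function.comp_def]
        rw [show ("" : String).toList = [] from rfl, show ("?" : String).toList = ['?'] from rfl,
          show ("." : String).toList = ['.'] from rfl]
        simp only [List.map_id']
        rw [PySem.Chars.join_nil_singletons, pv_join_eq, pv_join_eq,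
          List.append_assoc, List.singleton_append, pv_main text.toList [] k.toNat hklt]
        simp
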